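-- pv_equiv track=rewrite | github.com/vedprakash-m/vigor | backend/core/llm_orchestration/routing.py | route_by_task_type
-- ===== SOURCE A (Python) =====
-- def route_by_task_type(
--     task_type: str, available_models: list[str]
-- ) -> str | None:
--     """Route based on task type (coding, chat, analysis, etc.)"""
--
--     # Task-specific model preferences
--     task_preferences = {
--         "coding": ["gpt-4", "claude-3-sonnet", "gemini-pro"],
--         "chat": ["gpt-3.5-turbo", "gemini-pro", "perplexity"],
--         "analysis": ["gpt-4", "claude-3-opus", "gemini-pro"],
--         "creative": ["gpt-4", "claude-3-sonnet", "gemini-pro"],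
--         "factual": ["perplexity", "gemini-pro", "gpt-4"],
--     }
--
--     preferred_models = task_preferences.get(task_type, [])
--
--     # Find first available preferred model
--     for model in preferred_models:
--         if model in available_models:
--             return model
--
--     return None
-- ===== SOURCE B (Python) =====
-- def route_by_task_type(
--     task_type: str, available_models: list[str]
-- ) -> str | None:
--     """Route based on task type (coding, chat, analysis, etc.)"""
--
--     task_preferences = {
--         "coding": ["gpt-4", "claude-3-sonnet", "gemini-pro"],
--         "chat": ["gpt-3.5-turbo", "gemini-pro", "perplexity"],
--         "analysis": ["gpt-4", "claude-3-opus", "gemini-pro"],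
--         "creative": ["gpt-4", "claude-3-sonnet", "gemini-pro"],
--         "factual": ["perplexity", "gemini-pro", "gpt-4"],
--     }
--
--     preferred_models = task_preferences.get(task_type, [])
--
--     # Rank table: model -> position in the preference list
--     rank = {m: i for i, m in enumerate(preferred_models)}
--
--     # Single pass over available_models keeping the lowest-ranked candidate
--     best = None  # (model, rank) or None
--     for m in available_models:
--         r = rank.get(m)
--         if r is not None and (best is None or r < best[1]):
--             best = (m, r)
--
--     return best[0] if best is not None else None
-- ===== Notes on version B (the rewrite author's own statement) =====
-- stated objective: alternative
-- what changed: B inverts the traversal: instead of scanning the preference list and testing membership in available_models, it builds a rank table (model -> preference index) once and makes a single pass over available_models keeping the candidate with the strictly lowest rank.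
import Mathlib
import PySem

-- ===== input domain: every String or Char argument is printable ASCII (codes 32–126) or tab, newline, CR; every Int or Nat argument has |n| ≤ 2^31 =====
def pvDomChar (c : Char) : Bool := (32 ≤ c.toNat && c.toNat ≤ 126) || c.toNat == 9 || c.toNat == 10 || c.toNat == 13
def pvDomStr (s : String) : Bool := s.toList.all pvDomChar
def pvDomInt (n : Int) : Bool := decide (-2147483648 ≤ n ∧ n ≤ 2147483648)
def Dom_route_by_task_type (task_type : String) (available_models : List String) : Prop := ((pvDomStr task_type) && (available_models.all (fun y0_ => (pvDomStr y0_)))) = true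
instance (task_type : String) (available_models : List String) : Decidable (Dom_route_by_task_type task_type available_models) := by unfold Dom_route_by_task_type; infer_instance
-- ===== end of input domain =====

-- B inverts the traversal: a rank table over the preference list plus a single pass over
-- available_models keeping the lowest-ranked candidate (objective: alternative).

-- ===== PORT A =====
def pvTaskPreferences : PySem.Dict String (List String) :=
  PySem.Dict.ofList
    [ ("coding",   ["gpt-4", "claude-3-sonnet", "gemini-pro"])
    , ("chat",     ["gpt-3.5-turbo", "gemini-pro", "perplexity"])
    , ("analysis", ["gpt-4", "claude-3-opus", "gemini-pro"])
    , ("creative", ["gpt-4", "claude-3-sonnet", "gemini-pro"])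
    , ("factual",  ["perplexity", "gemini-pro", "gpt-4"]) ]

-- 'for model in preferred_models: if model in available_models: return model' / 'return None'
def pvFindPreferred (available_models : List String) : List String → Option String
  | [] => none
  | model :: rest =>
      if available_models.contains model then some model
      else pvFindPreferred available_models rest

def route_by_task_type (task_type : String) (available_models : List String) : Option String :=
  pvFindPreferred available_models (pvTaskPreferences.getD task_type [])

-- ===== PORT B =====
-- B builds the same task_preferences literal
def pvTaskPreferencesB : PySem.Dict String (List String) :=
  PySem.Dict.ofList
    [ ("coding",   ["gpt-4", "claude-3-sonnet", "gemini-pro"])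
    , ("chat",     ["gpt-3.5-turbo", "gemini-pro", "perplexity"])
    , ("analysis", ["gpt-4", "claude-3-opus", "gemini-pro"])
    , ("creative", ["gpt-4", "claude-3-sonnet", "gemini-pro"])
    , ("factual",  ["perplexity", "gemini-pro", "gpt-4"]) ]

def route_by_task_type_alt (task_type : String) (available_models : List String) : Option String :=
  let preferred_models := pvTaskPreferencesB.getD task_type []
  -- rank = {m: i for i, m in enumerate(preferred_models)}
  let rank : PySem.Dict String Int :=
    (PySem.List.enumerate preferred_models 0).foldl (fun d p => d.insert p.2 p.1) PySem.Dict.empty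
  -- single pass keeping the lowest-ranked candidate (strict improvement only)
  let best : Option (String × Int) :=
    available_models.foldl
      (fun best m =>
        match rank.get? m with
        | none => best
        | some r =>
          match best with
          | none => some (m, r)
          | some (_, br) => if r < br then some (m, r) else best)
      none
  match best with
  | some p => some p.1
  | none => none

-- ===== PRECONDITION & SPEC =====
def Spec_route_by_task_type (task_type : String) (available_models : List String) (out : Option String) : Prop := out = route_by_task_type_alt task_type available_models
instance (task_type : String) (available_models : List String) (out : Option String) : Decidable (Spec_route_by_task_type task_type available_models out) := by unfold Spec_route_by_task_type; infer_instance

-- ===== CLAIM (what is proved, stated in full; the proofs are below) =====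
def Claim_equal_route_by_task_type : Prop := ∀ (task_type : String) (available_models : List String), Dom_route_by_task_type task_type available_models → Spec_route_by_task_type task_type available_models (route_by_task_type task_type available_models)

-- ===== LEMMAS AND PROOFS =====

-- rank of a model in a preference list (first occurrence), proof-side mirror of B's rank dict
def pvRk : List String → String → Option Nat
  | [], _ => none
  | p :: ps, a => if p = a then some 0 else (pvRk ps a).map (· + 1)

def pvG (prefs : List String) (m : String) : Option Int := (pvRk prefs m).map (fun n => (n : Int))

def pvStep (g : String → Option Int) (best : Option (String × Int)) (m : String) : Option (String × Int) :=
  match g m with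
  | none => best
  | some r =>
    match best with
    | none => some (m, r)
    | some (_, br) => if r < br then some (m, r) else best

def pvCombine (s t : Option (String × Int)) : Option (String × Int) :=
  match t with
  | none => s
  | some (_, r) =>
    match s with
    | none => t
    | some (_, br) => if r < br then t else s

theorem pvCombine_assoc (s u t : Option (String × Int)) :
    pvCombine (pvCombine s u) t = pvCombine s (pvCombine u t) := by
  rcases s with _ | ⟨a, ra⟩ <;> rcases u with _ | ⟨b, rb⟩ <;> rcases t with _ | ⟨c, rc⟩ <;>
    try rfl
  all_goals
    first
    | (simp only [pvCombine]; split_ifs <;> rfl)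
    | (by_cases h1 : rb < ra <;> by_cases h2 : rc < rb <;> by_cases h3 : rc < ra <;>
        simp [pvCombine, h1, h2, h3] <;> (exfalso; omega))

theorem pvCombine_none_left (t : Option (String × Int)) : pvCombine none t = t := by
  rcases t with _ | ⟨c, rc⟩ <;> rfl

theorem pvStep_eq_combine (g : String → Option Int) (s : Option (String × Int)) (m : String) :
    pvStep g s m = pvCombine s (pvStep g none m) := by
  unfold pvStep pvCombine
  cases g m with
  | none => cases s <;> rfl
  | some r => rcases s with _ | ⟨x, rx⟩ <;> rfl

theorem pvLoop_acc (g : String → Option Int) (av : List String) :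
    ∀ s, av.foldl (pvStep g) s = pvCombine s (av.foldl (pvStep g) none) := by
  induction av with
  | nil => intro s; rfl
  | cons m ms ih =>
      intro s
      simp only [List.foldl_cons]
      rw [ih (pvStep g s m), ih (pvStep g none m), pvStep_eq_combine, ← pvCombine_assoc]

theorem pvLoop_inv (g : String → Option Int) (av : List String) :
    ∀ s, (∀ m r, s = some (m, r) → g m = some r) →
      ∀ m r, av.foldl (pvStep g) s = some (m, r) → g m = some r := by
  induction av with
  | nil => intro s hs; exact hs
  | cons x xs ih =>
      intro s hs
      refine ih (pvStep g s x) ?_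
      intro m r hm
      unfold pvStep at hm
      cases hgx : g x with
      | none => rw [hgx] at hm; exact hs m r hm
      | some rx =>
          rw [hgx] at hm
          rcases s with _ | ⟨m0, br⟩
          · simp at hm
            obtain ⟨h1, h2⟩ := hm
            subst h1 h2; exact hgx
          · by_cases h : rx < br
            · simp [h] at hm
              obtain ⟨h1, h2⟩ := hm
              subst h1 h2; exact hgx
            · simp [h] at hm
              obtain ⟨h1, h2⟩ := hm
              exact hs m r (by rw [h1, h2])

theorem pvRk_inj (prefs : List String) (a m : String) (n : Nat)
    (ha : pvRk prefs a = some n) (hm : pvRk prefs m = some n) : a = m := by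
  induction prefs generalizing n with
  | nil => simp [pvRk] at ha
  | cons p ps ih =>
      unfold pvRk at ha hm
      by_cases hpa : p = a <;> by_cases hpm : p = m
      · rw [← hpa, hpm]
      · subst hpa
        simp [hpm] at ha hm
        obtain ⟨k, hk, hkn⟩ := hm
        omega
      · subst hpm
        simp [hpa] at ha hm
        obtain ⟨k, hk, hkn⟩ := ha
        omega
      · simp [hpa, hpm] at ha hm
        obtain ⟨k, hk, hkn⟩ := ha
        obtain ⟨k', hk', hkn'⟩ := hm
        have : k = k' := by omega
        subst this
        exact ih k hk hk'

theorem pvFindPreferred_nil (prefs : List String) : pvFindPreferred [] prefs = none := by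
  induction prefs with
  | nil => rfl
  | cons p ps ih => simp [pvFindPreferred, ih]

theorem pvFindPreferred_contains (av prefs : List String) (m : String)
    (h : pvFindPreferred av prefs = some m) : m ∈ av := by
  induction prefs with
  | nil => simp [pvFindPreferred] at h
  | cons p ps ih =>
      unfold pvFindPreferred at h
      by_cases hc : p ∈ av
      · simp [hc] at h; rwa [← h]
      · simp [hc] at h; exact ih h

theorem pvFindPreferred_skip (av prefs : List String) (a : String) (ha : pvRk prefs a = none) :
    pvFindPreferred (a :: av) prefs = pvFindPreferred av prefs := by
  induction prefs with
  | nil => rfl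
  | cons p ps ih =>
      unfold pvRk at ha
      by_cases hpa : p = a
      · simp [hpa] at ha
      · simp [hpa] at ha
        unfold pvFindPreferred
        have hmem : (p ∈ a :: av) = (p ∈ av) := by
          simp [List.mem_cons]; intro h; exact absurd h hpa
        simp only [List.contains_eq_mem, hmem, ih ha]

theorem pvFindPreferred_found (av prefs : List String) (a : String) (n : Nat)
    (ha : pvRk prefs a = some n) (hnone : pvFindPreferred av prefs = none) :
    pvFindPreferred (a :: av) prefs = some a := by
  induction prefs generalizing n with
  | nil => simp [pvRk] at ha
  | cons p ps ih =>
      unfold pvFindPreferred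
      by_cases hpa : p = a
      · simp [hpa]
      · unfold pvRk at ha
        simp [hpa] at ha
        unfold pvFindPreferred at hnone
        by_cases hc : p ∈ av
        · simp [hc] at hnone
        · simp [hc] at hnone
          have hmem : p ∉ a :: av := by
            simp [List.mem_cons, hc]; exact hpa
          rcases ha with ⟨k, hk, -⟩
          simp [hmem]
          exact ih k hk hnone

theorem pvFindPreferred_better (av prefs : List String) (a m : String) (rn bn : Nat)
    (ha : pvRk prefs a = some rn) (hm : pvRk prefs m = some bn)
    (hfa : pvFindPreferred av prefs = some m) :
    pvFindPreferred (a :: av) prefs = if rn < bn then some a else some m := by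
  induction prefs generalizing rn bn with
  | nil => simp [pvRk] at ha
  | cons p ps ih =>
      unfold pvFindPreferred at hfa ⊢
      by_cases hpa : p = a
      · have hrn : rn = 0 := by simp [pvRk, hpa] at ha; omega
        subst hrn
        by_cases hbn : 0 < bn
        · simp [hpa, hbn]
        · have hbn0 : bn = 0 := by omega
          subst hbn0
          have hmp : m = p := by
            unfold pvRk at hm
            by_cases h : p = m
            · exact h.symm
            · simp [h] at hm
          subst hmp
          simp [hpa]
      · have ha' : ∃ rn', pvRk ps a = some rn' ∧ rn = rn' + 1 := by
          unfold pvRk at ha; simp [hpa] at ha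
          rcases ha with ⟨k, hk, hkk⟩; exact ⟨k, hk, hkk.symm⟩
        rcases ha' with ⟨rn', hrn', hrneq⟩
        by_cases hc : p ∈ av
        · simp [hc] at hfa
          subst hfa
          have hbn0 : bn = 0 := by
            simp [pvRk] at hm; omega
          subst hbn0 hrneq
          have hmem : p ∈ a :: av := by simp [hc]
          simp only [List.contains_eq_mem]
          rw [if_pos (by simpa using hmem)]
          simp
        · simp [hc] at hfa
          have hmnp : p ≠ m := by
            intro h
            exact hc (by rw [h]; exact pvFindPreferred_contains av ps m hfa)
          have hbn' : ∃ bn', pvRk ps m = some bn' ∧ bn = bn' + 1 := by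
            unfold pvRk at hm; simp [hmnp] at hm
            rcases hm with ⟨k, hk, hkk⟩; exact ⟨k, hk, hkk.symm⟩
          rcases hbn' with ⟨bn', hbn', hbneq⟩
          have hmem : p ∉ a :: av := by
            simp [List.mem_cons, hc]; exact hpa
          simp only [List.contains_eq_mem]
          rw [if_neg (by simpa using hmem)]
          rw [ih rn' bn' hrn' hbn' hfa]
          subst hrneq hbneq
          by_cases h : rn' < bn' <;> simp [h]

-- master lemma: B's single pass with ranks pvG prefs equals A's scan of prefs
theorem pvMaster (prefs av : List String) :
    (av.foldl (pvStep (pvG prefs)) none).map Prod.fst = pvFindPreferred av prefs := by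
  induction av with
  | nil => simp [pvFindPreferred_nil]
  | cons a as ih =>
      simp only [List.foldl_cons]
      rw [pvLoop_acc]
      cases hga : pvG prefs a with
      | none =>
          have hrk : pvRk prefs a = none := by
            unfold pvG at hga; cases h : pvRk prefs a <;> simp [h] at hga ⊢
          rw [pvFindPreferred_skip as prefs a hrk]
          have hstep : pvStep (pvG prefs) none a = none := by unfold pvStep; rw [hga]
          rw [hstep, pvCombine_none_left]
          exact ih
      | some r =>
          have hstep : pvStep (pvG prefs) none a = some (a, r) := by unfold pvStep; rw [hga]
          rw [hstep]
          rcases hrkn : pvRk prefs a with _ | rn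
          · simp [pvG, hrkn] at hga
          · have hr : r = (rn : Int) := by
              unfold pvG at hga; rw [hrkn] at hga; simp at hga; omega
            cases ht : as.foldl (pvStep (pvG prefs)) none with
            | none =>
                have hnone : pvFindPreferred as prefs = none := by
                  rw [← ih, ht]; rfl
                rw [pvFindPreferred_found as prefs a rn hrkn hnone]
                rfl
            | some p =>
                rcases p with ⟨m, br⟩
                have hgm : pvG prefs m = some br :=
                  pvLoop_inv (pvG prefs) as none (by intro _ _ h; cases h) m br ht
                rcases hrkm : pvRk prefs m with _ | bn
                · simp [pvG, hrkm] at hgm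
                · have hbr : br = (bn : Int) := by
                    unfold pvG at hgm; rw [hrkm] at hgm; simp at hgm; omega
                  have hfa : pvFindPreferred as prefs = some m := by
                    rw [← ih, ht]; rfl
                  rw [pvFindPreferred_better as prefs a m rn bn hrkn hrkm hfa]
                  subst hr hbr
                  by_cases h : rn < bn
                  · have h' : ¬ ((bn : Int) < (rn : Int)) := by exact_mod_cast not_lt.mpr (le_of_lt h)
                    simp [pvCombine, h, h']
                  · have h' : ((bn : Int) < (rn : Int)) ∨ bn = rn := by omega
                    rcases h' with h' | h'
                    · simp [pvCombine, h, h']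
                    · have heq : a = m := pvRk_inj prefs a m rn hrkn (by rw [hrkm, h'])
                      have : ¬ ((bn : Int) < (rn : Int)) := by omega
                      simp [pvCombine, h, this, heq]

-- B's loop with any dict whose lookup is pvG prefs computes A's scan
theorem pvAlt_generic (d : PySem.Dict String Int) (prefs av : List String)
    (hrank : ∀ m, d.get? m = pvG prefs m) :
    (match av.foldl
        (fun best m =>
          match d.get? m with
          | none => best
          | some r =>
            match best with
            | none => some (m, r)
            | some (_, br) => if r < br then some (m, r) else best)
        (none : Option (String × Int)) with
     | some p => some p.1
     | none => none) = pvFindPreferred av prefs := by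
  have hfun : (fun (best : Option (String × Int)) (m : String) =>
      match d.get? m with
      | none => best
      | some r =>
        match best with
        | none => some (m, r)
        | some (_, br) => if r < br then some (m, r) else best) = pvStep (pvG prefs) := by
    funext best m
    rw [hrank m]
    rfl
  rw [hfun]
  have hmas := pvMaster prefs av
  cases hres : av.foldl (pvStep (pvG prefs)) none with
  | none => rw [hres] at hmas; simpa using hmas
  | some p => rw [hres] at hmas; simpa using hmas

theorem pvMkPrefs : pvTaskPreferences = PySem.Dict.mk
    [ ("coding",   ["gpt-4", "claude-3-sonnet", "gemini-pro"])
    , ("chat",     ["gpt-3.5-turbo", "gemini-pro", "perplexity"])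
    , ("analysis", ["gpt-4", "claude-3-opus", "gemini-pro"])
    , ("creative", ["gpt-4", "claude-3-sonnet", "gemini-pro"])
    , ("factual",  ["perplexity", "gemini-pro", "gpt-4"]) ] := by decide

theorem pvBridge1 (m : String) :
    ((PySem.List.enumerate ["gpt-4", "claude-3-sonnet", "gemini-pro"] 0).foldl
        (fun d p => d.insert p.2 p.1) PySem.Dict.empty).get? m
      = pvG ["gpt-4", "claude-3-sonnet", "gemini-pro"] m := by
  have hmk : ((PySem.List.enumerate ["gpt-4", "claude-3-sonnet", "gemini-pro"] 0).foldl
      (fun d p => d.insert p.2 p.1) PySem.Dict.empty)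
      = PySem.Dict.mk [("gpt-4", 0), ("claude-3-sonnet", 1), ("gemini-pro", 2)] := by decide
  rw [hmk]
  by_cases h1 : "gpt-4" = m <;> by_cases h2 : "claude-3-sonnet" = m <;>
    by_cases h3 : "gemini-pro" = m <;>
    simp [PySem.Dict.get?, pvG, pvRk, h1, h2, h3]

theorem pvBridge2 (m : String) :
    ((PySem.List.enumerate ["gpt-3.5-turbo", "gemini-pro", "perplexity"] 0).foldl
        (fun d p => d.insert p.2 p.1) PySem.Dict.empty).get? m
      = pvG ["gpt-3.5-turbo", "gemini-pro", "perplexity"] m := by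
  have hmk : ((PySem.List.enumerate ["gpt-3.5-turbo", "gemini-pro", "perplexity"] 0).foldl
      (fun d p => d.insert p.2 p.1) PySem.Dict.empty)
      = PySem.Dict.mk [("gpt-3.5-turbo", 0), ("gemini-pro", 1), ("perplexity", 2)] := by decide
  rw [hmk]
  by_cases h1 : "gpt-3.5-turbo" = m <;> by_cases h2 : "gemini-pro" = m <;>
    by_cases h3 : "perplexity" = m <;>
    simp [PySem.Dict.get?, pvG, pvRk, h1, h2, h3]

theorem pvBridge3 (m : String) :
    ((PySem.List.enumerate ["gpt-4", "claude-3-opus", "gemini-pro"] 0).foldl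
        (fun d p => d.insert p.2 p.1) PySem.Dict.empty).get? m
      = pvG ["gpt-4", "claude-3-opus", "gemini-pro"] m := by
  have hmk : ((PySem.List.enumerate ["gpt-4", "claude-3-opus", "gemini-pro"] 0).foldl
      (fun d p => d.insert p.2 p.1) PySem.Dict.empty)
      = PySem.Dict.mk [("gpt-4", 0), ("claude-3-opus", 1), ("gemini-pro", 2)] := by decide
  rw [hmk]
  by_cases h1 : "gpt-4" = m <;> by_cases h2 : "claude-3-opus" = m <;>
    by_cases h3 : "gemini-pro" = m <;>
    simp [PySem.Dict.get?, pvG, pvRk, h1, h2, h3]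

theorem pvBridge4 (m : String) :
    ((PySem.List.enumerate ["perplexity", "gemini-pro", "gpt-4"] 0).foldl
        (fun d p => d.insert p.2 p.1) PySem.Dict.empty).get? m
      = pvG ["perplexity", "gemini-pro", "gpt-4"] m := by
  have hmk : ((PySem.List.enumerate ["perplexity", "gemini-pro", "gpt-4"] 0).foldl
      (fun d p => d.insert p.2 p.1) PySem.Dict.empty)
      = PySem.Dict.mk [("perplexity", 0), ("gemini-pro", 1), ("gpt-4", 2)] := by decide
  rw [hmk]
  by_cases h1 : "perplexity" = m <;> by_cases h2 : "gemini-pro" = m <;>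
    by_cases h3 : "gpt-4" = m <;>
    simp [PySem.Dict.get?, pvG, pvRk, h1, h2, h3]

theorem pvBridge0 (m : String) :
    ((PySem.List.enumerate ([] : List String) 0).foldl
        (fun d p => d.insert p.2 p.1) PySem.Dict.empty).get? m = pvG [] m := by
  rfl

-- ===== VERDICT (by name: the statement is the Claim_ definition above) =====
theorem route_by_task_type_spec : Claim_equal_route_by_task_type := by
  intro t av _
  unfold Spec_route_by_task_type route_by_task_type route_by_task_type_alt
  have hBA : pvTaskPreferencesB = pvTaskPreferences := by decide
  rw [hBA]
  symm
  by_cases h1 : "coding" = t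
  · rw [show pvTaskPreferences.getD t [] = ["gpt-4", "claude-3-sonnet", "gemini-pro"] by
      rw [pvMkPrefs]; simp [PySem.Dict.getD, PySem.Dict.get?_mk_cons, h1]]
    exact pvAlt_generic _ _ av pvBridge1
  · by_cases h2 : "chat" = t
    · rw [show pvTaskPreferences.getD t [] = ["gpt-3.5-turbo", "gemini-pro", "perplexity"] by
        rw [pvMkPrefs]; simp [PySem.Dict.getD, PySem.Dict.get?_mk_cons, h1, h2]]
      exact pvAlt_generic _ _ av pvBridge2
    · by_cases h3 : "analysis" = t
      · rw [show pvTaskPreferences.getD t [] = ["gpt-4", "claude-3-opus", "gemini-pro"] by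
          rw [pvMkPrefs]; simp [PySem.Dict.getD, PySem.Dict.get?_mk_cons, h1, h2, h3]]
        exact pvAlt_generic _ _ av pvBridge3
      · by_cases h4 : "creative" = t
        · rw [show pvTaskPreferences.getD t [] = ["gpt-4", "claude-3-sonnet", "gemini-pro"] by
            rw [pvMkPrefs]; simp [PySem.Dict.getD, PySem.Dict.get?_mk_cons, h1, h2, h3, h4]]
          exact pvAlt_generic _ _ av pvBridge1
        · by_cases h5 : "factual" = t
          · rw [show pvTaskPreferences.getD t [] = ["perplexity", "gemini-pro", "gpt-4"] by
              rw [pvMkPrefs]; simp [PySem.Dict.getD, PySem.Dict.get?_mk_cons, h1, h2, h3, h4, h5]]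
            exact pvAlt_generic _ _ av pvBridge4
          · rw [show pvTaskPreferences.getD t [] = [] by
              rw [pvMkPrefs]; simp [PySem.Dict.getD, PySem.Dict.get?, h1, h2, h3, h4, h5]]
            exact pvAlt_generic _ _ av pvBridge0
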